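-- pv_equiv track=rewrite | github.com/tinkerscript/gb_crypto_02 | 02.py | find_equal_blocks_count
-- ===== SOURCE A (Python) =====
-- def find_equal_blocks_count(encrypted):
--     count = 0
--     chunks = [encrypted[x:x + 16] for x in range(0, len(encrypted), 16)]
--
--     for i in range(len(chunks)):
--         for j in range(len(chunks)):
--             if i == j:
--                 continue
--
--             if chunks[i] == chunks[j]:
--                 count += 1
--
--     return count
-- ===== SOURCE B (Python) =====
-- def find_equal_blocks_count(encrypted):
--     counts = {}
--     for x in range(0, len(encrypted), 16):
--         block = encrypted[x:x + 16]
--         counts[block] = counts.get(block, 0) + 1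
--     return sum(k * (k - 1) for k in counts.values())
-- ===== Notes on version B (the rewrite author's own statement) =====
-- stated objective: faster
-- what changed: Replaces the quadratic all-pairs block comparison by a single pass that counts each 16-byte block in a dict and returns sum k*(k-1) over the multiplicities.
import Mathlib
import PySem

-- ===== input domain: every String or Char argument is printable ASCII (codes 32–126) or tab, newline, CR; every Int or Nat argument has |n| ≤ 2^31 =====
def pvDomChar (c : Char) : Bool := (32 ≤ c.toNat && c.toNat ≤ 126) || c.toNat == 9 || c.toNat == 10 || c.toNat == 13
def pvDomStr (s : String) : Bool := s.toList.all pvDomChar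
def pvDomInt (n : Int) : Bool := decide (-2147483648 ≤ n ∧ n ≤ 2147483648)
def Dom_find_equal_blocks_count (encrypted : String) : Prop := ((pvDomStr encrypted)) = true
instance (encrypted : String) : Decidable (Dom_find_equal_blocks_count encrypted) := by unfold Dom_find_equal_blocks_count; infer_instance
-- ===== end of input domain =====

-- B replaces A's quadratic all-pairs block comparison by one counting pass over the
-- blocks and the closed form sum k*(k-1) over the multiplicities (objective: faster).

-- ===== PORT A =====
def find_equal_blocks_count (encrypted : String) : Int :=
  let count : Int := 0
  let chunks : List String :=
    (PySem.List.pyRange 0 (PySem.Str.len encrypted) 16).map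
      (fun x => PySem.Str.slice encrypted (some x) (some (x + 16)))
  let count :=
    (PySem.List.pyRange 0 (PySem.List.len chunks) 1).foldl (fun count i =>
      (PySem.List.pyRange 0 (PySem.List.len chunks) 1).foldl (fun count j =>
        if i == j then count
        else if PySem.List.pyGetD chunks i "" == PySem.List.pyGetD chunks j "" then count + 1
        else count) count) count
  count

-- ===== PORT B =====
def find_equal_blocks_count_alt (encrypted : String) : Int :=
  let counts : PySem.Dict String Int :=
    (PySem.List.pyRange 0 (PySem.Str.len encrypted) 16).foldl
      (fun counts x =>
        let block := PySem.Str.slice encrypted (some x) (some (x + 16))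
        counts.insert block (counts.getD block 0 + 1))
      PySem.Dict.empty
  (counts.values.map (fun k => k * (k - 1))).sum

-- ===== PRECONDITION & SPEC =====
def Spec_find_equal_blocks_count (encrypted : String) (out : Int) : Prop := out = find_equal_blocks_count_alt encrypted
instance (encrypted : String) (out : Int) : Decidable (Spec_find_equal_blocks_count encrypted out) := by unfold Spec_find_equal_blocks_count; infer_instance

-- ===== CLAIM (what is proved, stated in full; the proofs are below) =====
def Claim_equal_find_equal_blocks_count : Prop := ∀ (encrypted : String), Dom_find_equal_blocks_count encrypted → Spec_find_equal_blocks_count encrypted (find_equal_blocks_count encrypted)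

-- ===== LEMMAS AND PROOFS =====

-- A's inner loop: skip j = i, else count matches of the predicate.
lemma inner_foldl (i : Int) (P : Int → Bool) (l : List Int) (c : Int) :
    l.foldl (fun c j => if i == j then c else if P j then c + 1 else c) c
      = c + ((l.filter (fun j => !(i == j) && P j)).length : Int) := by
  induction l generalizing c with
  | nil => simp
  | cons a t ih =>
    simp only [List.foldl_cons, List.filter_cons]
    by_cases h : (i == a) = true
    · simp only [h, if_true, Bool.not_true, Bool.false_and, Bool.false_eq_true,
        if_false, ih]
    · have h' : (i == a) = false := Bool.eq_false_iff.mpr h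
      by_cases hp : P a = true
      · simp only [h', Bool.false_eq_true, if_false, Bool.not_false, Bool.true_and, hp,
          if_true, ih]
        simp only [List.length_cons]
        push_cast
        ring
      · have hp' : P a = false := Bool.eq_false_iff.mpr hp
        simp only [h', Bool.false_eq_true, if_false, Bool.not_false, Bool.true_and, hp',
          ih]

-- on a nodup list containing i with P i, excluding j = i removes exactly one match
lemma filter_ne_length (i : Int) (P : Int → Bool) (l : List Int)
    (hn : l.Nodup) (hi : i ∈ l) (hP : P i = true) :
    (l.filter (fun j => !(i == j) && P j)).length + 1 = (l.filter P).length := by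
  induction l with
  | nil => simp at hi
  | cons a t ih =>
    rcases List.nodup_cons.mp hn with ⟨ha, hnt⟩
    by_cases hia : i = a
    · subst hia
      have hfe : t.filter (fun j => !(i == j) && P j) = t.filter P := by
        apply List.filter_congr
        intro x hx
        have : i ≠ x := fun h => ha (h ▸ hx)
        simp [this]
      simp [hP, hfe]
    · have hit : i ∈ t := by
        rcases List.mem_cons.mp hi with h | h
        · exact absurd h hia
        · exact h
      have hne : (i == a) = false := by simp [hia]
      by_cases hpa : P a = true
      · have h2 := ih hnt hit
        simp only [List.filter_cons, hne, Bool.not_false, Bool.true_and, hpa,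
          if_true, List.length_cons]
        omega
      · simp [hne, Bool.eq_false_iff.mpr hpa, ih hnt hit]

-- sum of g over l equals sum over distinct values weighted by multiplicity
lemma sum_over_dedup (l : List String) (g : String → Int) :
    (l.map g).sum
      = ((PySem.Set.ofList l).map (fun k => (l.count k : Int) * g k)).sum := by
  have hnd : (PySem.Set.ofList l).Nodup := PySem.Set.nodup_ofList l
  have hfin : (PySem.Set.ofList l).toFinset = l.toFinset := by
    ext x
    simp [List.mem_toFinset, PySem.Set.mem_ofList]
  calc (l.map g).sum = ∑ m ∈ l.toFinset, l.count m • g m := Finset.sum_list_map_count l g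
    _ = ∑ m ∈ (PySem.Set.ofList l).toFinset, (l.count m : Int) * g m := by
        rw [hfin]; exact Finset.sum_congr rfl (fun m _ => by push_cast [nsmul_eq_mul]; ring)
    _ = ((PySem.Set.ofList l).map (fun k => (l.count k : Int) * g k)).sum := by
        rw [List.sum_toFinset _ hnd]

-- ===== VERDICT (by name: the statement is the Claim_ definition above) =====
theorem find_equal_blocks_count_spec : Claim_equal_find_equal_blocks_count := by
  intro encrypted _
  unfold Spec_find_equal_blocks_count find_equal_blocks_count find_equal_blocks_count_alt
  set chunks : List String :=
    (PySem.List.pyRange 0 (PySem.Str.len encrypted) 16).map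
      (fun x => PySem.Str.slice encrypted (some x) (some (x + 16))) with hchunks
  -- B's counting loop builds Counter(chunks)
  have hcnt : (PySem.List.pyRange 0 (PySem.Str.len encrypted) 16).foldl
      (fun (counts : PySem.Dict String Int) x =>
        let block := PySem.Str.slice encrypted (some x) (some (x + 16))
        counts.insert block (counts.getD block 0 + 1)) PySem.Dict.empty
      = PySem.Dict.counter chunks := by
    rw [← PySem.Dict.foldl_insert_getD_add_one_eq_counter, hchunks, List.foldl_map]
  have hvals : (PySem.Dict.counter chunks).values
      = (PySem.Set.ofList chunks).map (fun k => (chunks.count k : Int)) := by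
    have h0 : (PySem.Dict.counter chunks).values
        = ((PySem.Dict.counter chunks).items).map (·.2) := rfl
    rw [h0, PySem.Dict.items_counter, List.map_map]
    simp
  -- A's inner loop counts the other equal chunks
  have hinner : ∀ (c i : Int), i ∈ PySem.List.pyRange 0 (PySem.List.len chunks) 1 →
      (PySem.List.pyRange 0 (PySem.List.len chunks) 1).foldl (fun count j =>
        if i == j then count
        else if PySem.List.pyGetD chunks i "" == PySem.List.pyGetD chunks j "" then count + 1
        else count) c
      = c + ((chunks.count (PySem.List.pyGetD chunks i "") : Int) - 1) := by
    intro c i hi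
    rw [inner_foldl i (fun j => PySem.List.pyGetD chunks i "" == PySem.List.pyGetD chunks j "")]
    have h1 := filter_ne_length i
      (fun j => PySem.List.pyGetD chunks i "" == PySem.List.pyGetD chunks j "")
      (PySem.List.pyRange 0 (PySem.List.len chunks) 1)
      (PySem.List.nodup_pyRange_one ..) hi (by simp)
    have h2 : ((PySem.List.pyRange 0 (PySem.List.len chunks) 1).filter
        (fun j => PySem.List.pyGetD chunks i "" == PySem.List.pyGetD chunks j "")).length
        = chunks.count (PySem.List.pyGetD chunks i "") := by
      rw [← List.countP_eq_length_filter]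
      have h3 : (PySem.List.pyRange 0 (PySem.List.len chunks) 1).countP
          (fun j => PySem.List.pyGetD chunks i "" == PySem.List.pyGetD chunks j "")
          = ((PySem.List.pyRange 0 (PySem.List.len chunks) 1).map
              (fun j => PySem.List.pyGetD chunks j "")).countP
              (fun s => PySem.List.pyGetD chunks i "" == s) := (List.countP_map ..).symm
      rw [h3, PySem.List.map_pyGetD_pyRange_zero]
      simp [List.count, BEq.comm]
    rw [h2] at h1
    push_cast [← h1]
    ring
  have hA := PySem.List.foldl_congr_mem _ _ _ (0 : Int) hinner
  have hAside : (PySem.List.pyRange 0 (PySem.List.len chunks) 1).foldl (fun count i =>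
      (PySem.List.pyRange 0 (PySem.List.len chunks) 1).foldl (fun count j =>
        if i == j then count
        else if PySem.List.pyGetD chunks i "" == PySem.List.pyGetD chunks j "" then count + 1
        else count) count) 0
      = (chunks.map (fun x => (chunks.count x : Int) - 1)).sum := by
    rw [hA,
      PySem.List.foldl_pyRange_zero_pyGetD chunks ""
        (fun acc s => acc + ((chunks.count s : Int) - 1)) 0,
      PySem.List.foldl_add chunks (fun s => (chunks.count s : Int) - 1) 0]
    ring
  have hBside : (List.map (fun k => k * (k - 1))
        ((PySem.List.pyRange 0 (PySem.Str.len encrypted) 16).foldl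
          (fun (counts : PySem.Dict String Int) x =>
            let block := PySem.Str.slice encrypted (some x) (some (x + 16))
            counts.insert block (counts.getD block 0 + 1)) PySem.Dict.empty).values).sum
      = ((PySem.Set.ofList chunks).map
          (fun k => (chunks.count k : Int) * ((chunks.count k : Int) - 1))).sum := by
    rw [hcnt, hvals, List.map_map]
    rfl
  exact hAside.trans ((sum_over_dedup chunks (fun x => (chunks.count x : Int) - 1)).trans hBside.symm)
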